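-- pv_equiv track=rewrite | github.com/morganstanley/treadmill | lib/python/treadmill/admin.py | _group_entry_by_opt
-- ===== SOURCE A (Python) =====
-- import itertools
--
-- def _group_entry_by_opt(entry):
--     """Group by attr;option."""
--     attrs_with_opt = [
--         tuple(k.split(';') + [entry[k]])
--         for k in entry.keys()
--         if ';' in k
--     ]
--     # Sort by option first, field name second
--     attrs_with_opt.sort(key=lambda x: (x[1], x[0]))
--     return {
--         key: list(group)[0::1]
--         for key, group in itertools.groupby(
--             attrs_with_opt,
--             lambda x: x[1]
--         )
--     }
-- ===== SOURCE B (Python) =====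
-- def _group_entry_by_opt(entry):
--     """Group by attr;option."""
--     buckets = {}
--     for key, value in entry.items():
--         if ';' in key:
--             field, opt = key.split(';')
--             buckets.setdefault(opt, []).append((field, opt, value))
--     return {opt: sorted(buckets[opt], key=lambda x: x[0])
--             for opt in sorted(buckets)}
-- ===== Notes on version B (the rewrite author's own statement) =====
-- stated objective: simpler
-- what changed: B replaces A's build-one-list / global sort by (option, field) / itertools.groupby pipeline by a per-option bucket dict filled in a single pass over the items, each bucket then sorted by field and emitted in sorted option order.
-- outside the precondition, e.g. on _group_entry_by_opt({'a;b;c': 'v'}): A returns {'b': [('a', 'b', 'c', 'v')]}, B raises ValueError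
import Mathlib
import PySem

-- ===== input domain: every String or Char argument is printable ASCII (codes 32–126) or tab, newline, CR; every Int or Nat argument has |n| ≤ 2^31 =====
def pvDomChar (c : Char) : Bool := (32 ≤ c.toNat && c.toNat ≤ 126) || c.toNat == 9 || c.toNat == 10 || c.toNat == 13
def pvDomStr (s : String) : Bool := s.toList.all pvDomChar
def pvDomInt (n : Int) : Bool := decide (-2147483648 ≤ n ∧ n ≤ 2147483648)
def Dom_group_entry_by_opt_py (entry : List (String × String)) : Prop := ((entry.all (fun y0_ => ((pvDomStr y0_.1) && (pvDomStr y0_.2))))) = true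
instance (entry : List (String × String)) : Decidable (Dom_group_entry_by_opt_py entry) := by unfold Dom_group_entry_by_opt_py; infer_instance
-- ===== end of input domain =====

-- B groups the triples into per-option buckets in one pass over the dict and sorts each small
-- bucket by field, instead of globally sorting one list by (option, field) and slicing it back
-- apart with itertools.groupby (objective: simpler).

-- ===== PORT A =====
-- tuple(k.split(';') + [entry[k]]) as a 3-tuple (field, option, value); exact for keys with
-- exactly one ';' — inside Pre_ every key that contains ';' splits into exactly two parts
def pvTripleOf (k v : String) : String × String × String :=
  match PySem.Str.split? k ";" with
  | some (f :: o :: _) => (f, o, v)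
  | _ => (k, "", v)

-- itertools.groupby: consecutive runs of equal key x[1], each group materialised as a list
def pyGroupby : List (String × String × String) → List (String × List (String × String × String))
  | [] => []
  | x :: xs =>
    (x.2.1, x :: xs.takeWhile (fun y => y.2.1 == x.2.1)) ::
      pyGroupby (xs.dropWhile (fun y => y.2.1 == x.2.1))
  termination_by l => l.length
  decreasing_by simpa using Nat.lt_succ_of_le (List.length_dropWhile_le _ _)

def group_entry_by_opt_py (entry : List (String × String)) : List (String × List (String × String × String)) :=
  -- entry is a Python dict: entry.keys() with entry[k] iterates its items in insertion order
  let d := PySem.Dict.ofList entry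
  let attrs_with_opt :=
    (d.items.filter (fun p => PySem.Str.isIn ";" p.1)).map (fun p => pvTripleOf p.1 p.2)
  -- attrs_with_opt.sort(key=lambda x: (x[1], x[0]))
  let sorted_attrs := PySem.List.sorted2 attrs_with_opt (fun x => x.2.1) (fun x => x.1)
  -- {key: list(group)[0::1] for key, group in itertools.groupby(..., lambda x: x[1])}
  ((pyGroupby sorted_attrs).foldl
      (fun r g => r.insert g.1 (PySem.List.slice g.2 (some 0) none)) PySem.Dict.empty).items

-- ===== PORT B =====
def group_entry_by_opt_py_alt (entry : List (String × String)) : List (String × List (String × String × String)) :=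
  let buckets := (PySem.Dict.ofList entry).items.foldl
    (fun d p =>
      if PySem.Str.isIn ";" p.1 then
        match PySem.Str.split? p.1 ";" with
        | some [f, o] => d.modify o [] (fun b => b ++ [(f, o, p.2)]) -- setdefault(opt, []).append(…)
        | _ => d  -- «field, opt = key.split(';')» raises ValueError: such keys are outside Pre_
      else d)
    PySem.Dict.empty
  -- {opt: sorted(buckets[opt], key=lambda x: x[0]) for opt in sorted(buckets)}
  ((PySem.List.sorted buckets.keys (fun k => k)).foldl
      (fun r o => r.insert o (PySem.List.sorted (buckets.getD o []) (fun x => x.1)))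
      PySem.Dict.empty).items

-- ===== PRECONDITION & SPEC =====
-- Pre_ excludes entries having a key with two or more ';' (it splits into >2 parts): on those A
-- returns 4-tuples (not values of the declared triple type) and B's tuple unpacking raises ValueError.
def Pre_group_entry_by_opt_py (entry : List (String × String)) : Prop :=
  ∀ p ∈ entry, ((PySem.Str.split? p.1 ";").getD []).length ≤ 2
instance (entry : List (String × String)) : Decidable (Pre_group_entry_by_opt_py entry) := by
  unfold Pre_group_entry_by_opt_py; infer_instance

def pvWitness_group_entry_by_opt_py : (List (String × String)) :=
  [("a;b", "v"), ("c;b", "w"), ("plain", "x")]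

def Spec_group_entry_by_opt_py (entry : List (String × String)) (out : List (String × List (String × String × String))) : Prop := out = group_entry_by_opt_py_alt entry
instance (entry : List (String × String)) (out : List (String × List (String × String × String))) : Decidable (Spec_group_entry_by_opt_py entry out) := by unfold Spec_group_entry_by_opt_py; infer_instance

-- ===== CLAIM (what is proved, stated in full; the proofs are below) =====
def Claim_equal_group_entry_by_opt_py : Prop := ∀ (entry : List (String × String)), Dom_group_entry_by_opt_py entry → Pre_group_entry_by_opt_py entry → Spec_group_entry_by_opt_py entry (group_entry_by_opt_py entry)

-- ===== LEMMAS AND PROOFS =====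

-- the sort key of A: the tuple (x[1], x[0]) under Python's lexicographic comparison
def pvKey (t : String × String × String) : Lex (String × String) := toLex (t.2.1, t.1)

-- the list of triples built from the keys containing ';'
def pvT (entry : List (String × String)) : List (String × String × String) :=
  ((PySem.Dict.ofList entry).items.filter (fun p => PySem.Str.isIn ";" p.1)).map
    (fun p => pvTripleOf p.1 p.2)

-- one bucket, sorted by field
def pvB (T : List (String × String × String)) (o : String) : List (String × String × String) :=
  PySem.List.sorted (T.filter (fun t => t.2.1 == o)) (fun x => x.1)

-- the distinct options in sorted order
def pvOs (T : List (String × String × String)) : List String :=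
  PySem.List.sorted (PySem.Set.ofList (T.map (fun t => t.2.1))) (fun k => k)

-- PySem.Chars.splitOn with a single-character separator is Lean's List.splitOn
theorem pvSplitOn_go_spec (c : Char) (fuel : Nat) :
    ∀ (l cur : List Char) (acc : List (List Char)), l.length ≤ fuel →
      PySem.Chars.splitOn.go [c] fuel l cur acc
        = acc.reverse ++ (l.splitOn c).modifyHead (cur.reverse ++ ·) := by
  induction fuel with
  | zero =>
    intro l cur acc h
    have : l = [] := List.eq_nil_of_length_eq_zero (Nat.le_zero.mp h)
    subst this
    simp [PySem.Chars.splitOn.go, List.splitOn]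
  | succ n ih =>
    intro l cur acc h
    cases l with
    | nil => simp [PySem.Chars.splitOn.go, List.splitOn]
    | cons a t =>
      by_cases hc : a = c
      · subst hc
        rw [PySem.Chars.splitOn.go]
        simp only [List.isPrefixOf, BEq.rfl, Bool.true_and, if_pos]
        rw [show List.drop [a].length (a :: t) = t from rfl, ih t [] _ (by simpa using h)]
        simp [List.splitOn, List.splitOnP_cons]
        exact congrFun (List.modifyHead_id) _
      · rw [PySem.Chars.splitOn.go]
        have hpf : [c].isPrefixOf (a :: t) = false := by
          simp [List.isPrefixOf, Ne.symm hc]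
        rw [hpf]
        simp only [Bool.false_eq_true, if_false]
        rw [ih t (a :: cur) acc (by simpa using h)]
        have hsp : (a :: t).splitOn c = ((t.splitOn c).modifyHead (a :: ·)) := by
          simp [List.splitOn, List.splitOnP_cons, hc]
        rw [hsp, List.modifyHead_modifyHead]
        have hfun : ((fun x => cur.reverse ++ x) ∘ fun x => a :: x)
            = (fun x => (a :: cur).reverse ++ x) := by
          funext x; simp
        rw [hfun]

theorem pvSplitOn_singleton (c : Char) (l : List Char) :
    PySem.Chars.splitOn l [c] = l.splitOn c := by
  rw [PySem.Chars.splitOn, pvSplitOn_go_spec c (l.length + 1) l [] [] (Nat.le_succ _)]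
  simp
  exact congrFun (List.modifyHead_id) _

-- a string containing c splits into at least two parts
theorem pvSplitOn_mem_length (c : Char) (l : List Char) (h : c ∈ l) :
    2 ≤ (l.splitOn c).length := by
  induction l with
  | nil => simp at h
  | cons a t ih =>
    by_cases hc : a = c
    · subst hc
      have hne := List.splitOnP_ne_nil (fun x => x == a) t
      have hlen : 1 ≤ (List.splitOnP (fun x => x == a) t).length :=
        Nat.one_le_iff_ne_zero.mpr (fun hz => hne (List.eq_nil_of_length_eq_zero hz))
      simp only [List.splitOn, List.splitOnP_cons, BEq.rfl, if_pos, List.length_cons]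
      omega
    · have ht : c ∈ t := by
        rcases List.mem_cons.mp h with h' | h'
        · exact absurd h'.symm hc
        · exact h'
      have := ih ht
      simpa [List.splitOn, List.splitOnP_cons, hc, List.length_modifyHead] using this

-- a two-part split determines the string
theorem pvSplitOn_pair (c : Char) (l f o : List Char) (h : l.splitOn c = [f, o]) :
    l = f ++ c :: o := by
  have hi := List.intercalate_splitOn l c
  rw [h] at hi
  rw [← hi]
  simp [List.intercalate]

-- a key admitted by Pre_ that contains ';' splits into exactly two parts, which determine it
theorem pvKeySplit (k : String) (hin : PySem.Str.isIn ";" k = true)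
    (hle : ((PySem.Str.split? k ";").getD []).length ≤ 2) :
    ∃ F O : String, PySem.Str.split? k ";" = some [F, O]
      ∧ k.toList = F.toList ++ ';' :: O.toList
      ∧ (∀ v, pvTripleOf k v = (F, O, v)) := by
  have hmem : ';' ∈ k.toList := by
    have := (PySem.Str.isIn_iff_infix ";" k).mp hin
    exact (List.singleton_infix_iff ';' k.toList).mp (by simpa using this)
  have hsome : PySem.Str.split? k ";" = some ((k.toList.splitOn ';').map String.ofList) := by
    have hh : PySem.Chars.split? k.toList [';'] = some (k.toList.splitOn ';') := by
      simp [PySem.Chars.split?, pvSplitOn_singleton]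
    simp [PySem.Str.split?, show (";" : String).toList = [';'] from rfl, hh]
  have hge := pvSplitOn_mem_length ';' k.toList hmem
  rw [hsome] at hle
  simp only [Option.getD_some, List.length_map] at hle
  have hlen2 : (k.toList.splitOn ';').length = 2 := le_antisymm hle hge
  obtain ⟨f, o, hfo⟩ : ∃ f o, k.toList.splitOn ';' = [f, o] := by
    match hsp : k.toList.splitOn ';' with
    | [] => rw [hsp] at hlen2; simp at hlen2
    | [_] => rw [hsp] at hlen2; simp at hlen2
    | [f, o] => exact ⟨f, o, rfl⟩
    | _ :: _ :: _ :: _ => rw [hsp] at hlen2; simp at hlen2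
  refine ⟨String.ofList f, String.ofList o, ?_, ?_, ?_⟩
  · rw [hsome, hfo]; rfl
  · simpa [String.toList_ofList] using pvSplitOn_pair ';' k.toList f o hfo
  · intro v
    unfold pvTripleOf
    rw [hsome, hfo]
    rfl

-- A's sort by the tuple key (x[1], x[0]) is the sort by the lexicographic key pvKey
theorem pvSorted2_eq (T : List (String × String × String)) :
    PySem.List.sorted2 T (fun x => x.2.1) (fun x => x.1) = PySem.List.sorted T pvKey := by
  rw [PySem.List.sorted_eq_foldl_insertBy]
  unfold PySem.List.sorted2
  simp only [Bool.false_eq_true, if_false]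
  have hcmp : (fun a b : String × String × String =>
        decide (a.2.1 < b.2.1) || (!decide (b.2.1 < a.2.1) && decide (a.1 < b.1)))
      = (fun a b => decide (pvKey a < pvKey b)) := by
    funext a b
    rcases lt_trichotomy a.2.1 b.2.1 with h | h | h
    · simp [pvKey, Prod.Lex.lt_iff, h, asymm h]
    · simp [pvKey, Prod.Lex.lt_iff, h]
    · simp [pvKey, Prod.Lex.lt_iff, h, asymm h, ne_of_gt h]
  rw [hcmp]

-- pyGroupby of a concatenation of nonempty constant-option blocks with distinct options
theorem pvGroupby_flatMap (blocks : String → List (String × String × String)) :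
    ∀ (os : List String), os.Nodup →
      (∀ o ∈ os, blocks o ≠ [] ∧ ∀ y ∈ blocks o, y.2.1 = o) →
      pyGroupby (os.flatMap blocks) = os.map (fun o => (o, blocks o)) := by
  intro os
  induction os with
  | nil => intro _ _; simp [pyGroupby]
  | cons o os ih =>
    intro hnd hb
    obtain ⟨hne, hall⟩ := hb o (List.mem_cons_self ..)
    obtain ⟨b, bs, hbo⟩ : ∃ b bs, blocks o = b :: bs := by
      match hx : blocks o with
      | [] => exact absurd hx hne
      | b :: bs => exact ⟨b, bs, rfl⟩
    have hrest : ∀ r ∈ os.flatMap blocks, (r.2.1 == o) = false := by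
      intro r hr
      obtain ⟨o', ho', hro'⟩ := List.mem_flatMap.mp hr
      have : r.2.1 = o' := ((hb o' (List.mem_cons_of_mem _ ho')).2) r hro'
      have hne' : o' ≠ o := fun he => (List.nodup_cons.mp hnd).1 (he ▸ ho')
      simp [this, hne']
    have hkey : b.2.1 = o := hall b (by simp [hbo])
    have hbs : ∀ y ∈ bs, (y.2.1 == b.2.1) = true := by
      intro y hy
      simp [hall y (by simp [hbo, hy]), hkey]
    have htw : List.takeWhile (fun y => y.2.1 == b.2.1) (bs ++ os.flatMap blocks)
        = bs := by
      rw [List.takeWhile_append, if_pos]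
      · cases hre : os.flatMap blocks with
        | nil => simp
        | cons r t =>
          rw [List.takeWhile_cons_of_neg, List.append_nil]
          rw [hkey]
          simp [hrest r (by rw [hre]; exact List.mem_cons_self ..)]
      · rw [List.takeWhile_eq_self_iff.mpr hbs]
    have hdw : List.dropWhile (fun y => y.2.1 == b.2.1) (bs ++ os.flatMap blocks)
        = os.flatMap blocks := by
      rw [List.dropWhile_append, if_pos]
      · cases hre : os.flatMap blocks with
        | nil => simp
        | cons r t =>
          rw [List.dropWhile_cons_of_neg]
          rw [hkey]
          simp [hrest r (by rw [hre]; exact List.mem_cons_self ..)]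
      · rw [List.dropWhile_eq_nil_iff.mpr hbs]; rfl
    have hstep : pyGroupby (b :: (bs ++ os.flatMap blocks))
        = (b.2.1, b :: (bs ++ os.flatMap blocks).takeWhile (fun y => y.2.1 == b.2.1))
            :: pyGroupby ((bs ++ os.flatMap blocks).dropWhile (fun y => y.2.1 == b.2.1)) := by
      rw [pyGroupby]
    have hihs := ih (List.nodup_cons.mp hnd).2 (fun o' ho' => hb o' (List.mem_cons_of_mem _ ho'))
    calc pyGroupby ((o :: os).flatMap blocks)
        = pyGroupby (b :: (bs ++ os.flatMap blocks)) := by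
          rw [List.flatMap_cons, hbo]; rfl
      _ = (o, blocks o) :: pyGroupby (os.flatMap blocks) := by
          rw [hstep, htw, hdw, hkey, hbo]
      _ = (o :: os).map (fun o => (o, blocks o)) := by rw [hihs]; rfl


-- partition of T by its options, concatenated over distinct covering options, is a permutation
theorem pvPerm_flatMap_filter :
    ∀ (os : List String) (T : List (String × String × String)), os.Nodup →
      (∀ t ∈ T, t.2.1 ∈ os) →
      (os.flatMap (fun o => T.filter (fun t => t.2.1 == o))).Perm T := by
  intro os
  induction os with
  | nil =>
    intro T _ hcov
    have : T = [] := List.eq_nil_iff_forall_not_mem.mpr (fun t ht => by simpa using hcov t ht)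
    simp [this]
  | cons o os ih =>
    intro T hnd hcov
    rw [List.flatMap_cons]
    have hcongr : os.flatMap (fun o' => T.filter (fun t => t.2.1 == o'))
        = os.flatMap (fun o' => (T.filter (fun t => !(t.2.1 == o))).filter (fun t => t.2.1 == o')) := by
      rw [List.flatMap, List.flatMap]
      congr 1
      apply List.map_congr_left
      intro o' ho'
      have hoo : o' ≠ o := fun he => (List.nodup_cons.mp hnd).1 (he ▸ ho')
      rw [List.filter_filter]
      apply List.filter_congr
      intro t _
      by_cases ht : t.2.1 = o'
      · simp [ht, hoo]
      · simp [ht]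
    rw [hcongr]
    have hperm := ih (T.filter (fun t => !(t.2.1 == o))) (List.nodup_cons.mp hnd).2 ?_
    · exact (List.Perm.append_left _ hperm).trans (List.filter_append_perm _ T)
    · intro t ht
      have hmem := List.mem_filter.mp ht
      have := hcov t hmem.1
      rcases List.mem_cons.mp this with h | h
      · exfalso
        have h2 := hmem.2
        rw [h] at h2
        simp at h2
      · exact h

-- replacing each filtered block by its sorted version keeps the permutation
theorem pvPerm_sorted_blocks (T : List (String × String × String)) :
    ∀ (os : List String),
      (os.flatMap (fun o => pvB T o)).Perm (os.flatMap (fun o => T.filter (fun t => t.2.1 == o))) := by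
  intro os
  induction os with
  | nil => simp
  | cons o os ih =>
    rw [List.flatMap_cons, List.flatMap_cons]
    exact List.Perm.append (PySem.List.sorted_perm _ _ _) ih

theorem pvMem_pvB (T : List (String × String × String)) (o : String)
    (y : String × String × String) (hy : y ∈ pvB T o) : y ∈ T ∧ y.2.1 = o := by
  have := (PySem.List.sorted_perm _ _ _).mem_iff.mp hy
  have hm := List.mem_filter.mp this
  exact ⟨hm.1, by simpa using hm.2⟩

-- the concatenation of the sorted buckets, in sorted option order, is strictly
-- increasing in A's sort key
theorem pvPairwise_flat (T : List (String × String × String))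
    (hnd : (T.map pvKey).Nodup) :
    List.Pairwise (fun a b => pvKey a < pvKey b) ((pvOs T).flatMap (fun o => pvB T o)) := by
  rw [List.flatMap_def]
  rw [List.pairwise_flatten]
  constructor
  · intro bl hbl
    obtain ⟨o, _, hbo⟩ := List.mem_map.mp hbl
    subst hbo
    have hpw := PySem.List.sorted_pairwise (T.filter (fun t => t.2.1 == o)) (fun x => x.1)
    have hblnd : ((pvB T o).map pvKey).Nodup := by
      have hsub : (T.filter (fun t => t.2.1 == o)).Sublist T := List.filter_sublist
      have h1 : ((T.filter (fun t => t.2.1 == o)).map pvKey).Nodup :=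
        hnd.sublist (hsub.map pvKey)
      exact (((PySem.List.sorted_perm _ _ _).map pvKey).nodup_iff).mpr h1
    have hne : List.Pairwise (fun a b => pvKey a ≠ pvKey b) (pvB T o) :=
      List.pairwise_map.mp hblnd
    have hand := List.Pairwise.and hpw hne
    apply hand.imp_of_mem
    intro a b ha hb hab
    have hao := (pvMem_pvB T o a ha).2
    have hbo := (pvMem_pvB T o b hb).2
    rw [pvKey, pvKey, Prod.Lex.lt_iff]
    right
    constructor
    · simpa using hao.trans hbo.symm
    · have : a.1 ≠ b.1 := by
        intro he
        exact hab.2 (by simp [pvKey, hao, hbo, he])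
      simpa using lt_of_le_of_ne hab.1 this
  · have hosle := PySem.List.sorted_pairwise (PySem.Set.ofList (T.map (fun t => t.2.1))) (fun k => k)
    have hosnd : (pvOs T).Nodup :=
      ((PySem.List.sorted_perm _ _ _).nodup_iff).mpr (PySem.Set.nodup_ofList _)
    have hlt : List.Pairwise (fun a b => a < b) (pvOs T) :=
      (List.Pairwise.and hosle (List.Pairwise.imp (fun h => h) hosnd)).imp
        (fun h => lt_of_le_of_ne h.1 h.2)
    apply List.pairwise_map.mpr
    apply hlt.imp_of_mem
    intro o1 o2 _ _ h12 x hx y hy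
    have hx2 := (pvMem_pvB T o1 x hx).2
    have hy2 := (pvMem_pvB T o2 y hy).2
    rw [pvKey, pvKey, Prod.Lex.lt_iff]
    left
    simpa [hx2, hy2] using h12

theorem pvKeys_ofList {ν : Type} (entry : List (String × ν)) :
    (PySem.Dict.ofList entry).keys = PySem.Set.ofList (entry.map (fun p => p.1)) := by
  show (List.foldl (fun acc p => acc.insert p.1 p.2) PySem.Dict.empty entry).keys = _
  rw [PySem.Dict.keys_foldl_insert_key entry (fun p => p.1) (fun _ p => p.2) PySem.Dict.empty]
  rw [PySem.Dict.keys_empty, PySem.Set.update_nil_left]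

-- the main equivalence, on entries admitted by Pre_
theorem pvMain (entry : List (String × String))
    (hpre : Pre_group_entry_by_opt_py entry) :
    group_entry_by_opt_py entry = group_entry_by_opt_py_alt entry := by
  have hpre' : ∀ p ∈ (PySem.Dict.ofList entry).items,
      ((PySem.Str.split? p.1 ";").getD []).length ≤ 2 := by
    intro p hp
    have h1 : p.1 ∈ (PySem.Dict.ofList entry).keys :=
      PySem.Dict.mem_keys_of_mem_items _ hp
    rw [pvKeys_ofList] at h1
    obtain ⟨q, hq, hqe⟩ := List.mem_map.mp ((PySem.Set.mem_ofList _ _).mp h1)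
    exact hqe ▸ hpre q hq
  have hfacts : ∀ p ∈ (PySem.Dict.ofList entry).items.filter
        (fun p => PySem.Str.isIn ";" p.1),
      ∃ F O : String, PySem.Str.split? p.1 ";" = some [F, O]
        ∧ p.1.toList = F.toList ++ ';' :: O.toList
        ∧ (∀ v, pvTripleOf p.1 v = (F, O, v)) := by
    intro p hp
    have hm := List.mem_filter.mp hp
    exact pvKeySplit p.1 hm.2 (hpre' p hm.1)
  have hkeysnd : ((PySem.Dict.ofList entry).items.map (fun p => p.1)).Nodup := by
    have h := PySem.Dict.nodup_keys_ofList entry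
    simpa [PySem.Dict.keys] using h
  have hfilnd : (((PySem.Dict.ofList entry).items.filter
      (fun p => PySem.Str.isIn ";" p.1)).map (fun p => p.1)).Nodup :=
    hkeysnd.sublist ((List.filter_sublist).map _)
  have hTnd : ((pvT entry).map pvKey).Nodup := by
    unfold pvT
    rw [List.map_map]
    apply List.Nodup.map_on ?_ (hfilnd.of_map)
    intro p hp q hq he
    obtain ⟨Fp, Op, hps, hpl, hpt⟩ := hfacts p hp
    obtain ⟨Fq, Oq, hqs, hql, hqt⟩ := hfacts q hq
    have he' : (Op, Fp) = (Oq, Fq) := by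
      have h1 : pvKey (Fp, Op, p.2) = pvKey (Fq, Oq, q.2) := by
        simpa [Function.comp, hpt p.2, hqt q.2] using he
      simpa [pvKey] using h1
    have hk : p.1 = q.1 := by
      apply String.toList_inj.mp
      rw [hpl, hql, (Prod.mk.injEq .. ).mp he' |>.2,
        (Prod.mk.injEq .. ).mp he' |>.1]
    exact List.inj_on_of_nodup_map hfilnd hp hq hk
  have hosnd : (pvOs (pvT entry)).Nodup :=
    ((PySem.List.sorted_perm _ _ _).nodup_iff).mpr (PySem.Set.nodup_ofList _)
  have hcovos : ∀ t ∈ pvT entry, t.2.1 ∈ pvOs (pvT entry) := by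
    intro t ht
    exact ((PySem.List.sorted_perm _ _ _).mem_iff).mpr
      ((PySem.Set.mem_ofList _ _).mpr (List.mem_map_of_mem ht))
  have hC : PySem.List.sorted (pvT entry) pvKey
      = (pvOs (pvT entry)).flatMap (fun o => pvB (pvT entry) o) :=
    PySem.List.sorted_eq_of_perm_of_pairwise_lt _ _ _
      ((pvPerm_sorted_blocks (pvT entry) (pvOs (pvT entry))).trans
        (pvPerm_flatMap_filter (pvOs (pvT entry)) (pvT entry) hosnd hcovos))
      (pvPairwise_flat (pvT entry) hTnd)
  have hblocks : ∀ o ∈ pvOs (pvT entry), pvB (pvT entry) o ≠ []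
      ∧ ∀ y ∈ pvB (pvT entry) o, y.2.1 = o := by
    intro o ho
    refine ⟨?_, fun y hy => (pvMem_pvB _ o y hy).2⟩
    obtain ⟨t, ht, hto⟩ := List.mem_map.mp
      ((PySem.Set.mem_ofList _ _).mp (((PySem.List.sorted_perm _ _ _).mem_iff).mp ho))
    intro hnil
    exact (List.ne_nil_of_mem (List.mem_filter.mpr ⟨ht, by simp [hto]⟩))
      ((PySem.List.sorted_eq_nil_iff _ _ _).mp hnil)
  have hgroup : pyGroupby ((pvOs (pvT entry)).flatMap (fun o => pvB (pvT entry) o))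
      = (pvOs (pvT entry)).map (fun o => (o, pvB (pvT entry) o)) :=
    pvGroupby_flatMap _ _ hosnd hblocks
  -- A's side
  have hA : group_entry_by_opt_py entry
      = (((pvOs (pvT entry)).map (fun o => (o, pvB (pvT entry) o))).foldl
          (fun (r : PySem.Dict String (List (String × String × String))) (g : String × List (String × String × String)) => r.insert g.1 g.2) PySem.Dict.empty).items := by
    show ((pyGroupby (PySem.List.sorted2 (pvT entry) (fun x => x.2.1) (fun x => x.1))).foldl
        (fun r g => r.insert g.1 (PySem.List.slice g.2 (some 0) none)) PySem.Dict.empty).items = _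
    rw [pvSorted2_eq, hC, hgroup]
    simp only [PySem.List.slice_zero_start, PySem.List.slice_none_none]
  -- B's buckets
  have hstep : (PySem.Dict.ofList entry).items.foldl
      (fun d p =>
        if PySem.Str.isIn ";" p.1 then
          match PySem.Str.split? p.1 ";" with
          | some [f, o] => d.modify o [] (fun b => b ++ [(f, o, p.2)])
          | _ => d
        else d)
      PySem.Dict.empty
      = ((pvT entry).map (fun t => (t.2.1, t))).foldl
          (fun d p => d.modify p.1 [] (fun b => b ++ [p.2])) PySem.Dict.empty := by
    refine (PySem.List.foldl_congr_mem _ _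
      (fun (d : PySem.Dict String (List (String × String × String))) p =>
        if PySem.Str.isIn ";" p.1 then
          d.modify (pvTripleOf p.1 p.2).2.1 [] (fun b => b ++ [pvTripleOf p.1 p.2]) else d)
      _ ?_).trans ?_
    · intro acc p hp
      by_cases hin : PySem.Str.isIn ";" p.1 = true
      · obtain ⟨F, O, hps, hpl, hpt⟩ := hfacts p (List.mem_filter.mpr ⟨hp, hin⟩)
        simp only [hin, hps, hpt p.2, if_true]
      · simp only [hin, Bool.false_eq_true, if_false]
    · rw [PySem.List.foldl_if_eq_foldl_filter]
      unfold pvT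
      rw [List.map_map, List.foldl_map]
      rfl
  have hkeysB : (((pvT entry).map (fun t => (t.2.1, t))).foldl
      (fun d p => d.modify p.1 [] (fun b => b ++ [p.2])) PySem.Dict.empty).keys
      = PySem.Set.ofList ((pvT entry).map (fun t => t.2.1)) := by
    simp only [PySem.Dict.keys_foldl_modify_key]
    rw [PySem.Dict.keys_empty, PySem.Set.update_nil_left, List.map_map]
    rfl
  have hgetD : ∀ o : String, (((pvT entry).map (fun t => (t.2.1, t))).foldl
      (fun d p => d.modify p.1 [] (fun b => b ++ [p.2])) PySem.Dict.empty).getD o []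
      = (pvT entry).filter (fun t => t.2.1 == o) := by
    intro o
    simp only [PySem.Dict.getD_foldl_modify_append, PySem.Dict.getD_empty, List.nil_append,
      List.filter_map, List.map_map]
    exact List.map_id _
  have hB : group_entry_by_opt_py_alt entry
      = (((pvOs (pvT entry)).map (fun o => (o, pvB (pvT entry) o))).foldl
          (fun (r : PySem.Dict String (List (String × String × String))) (g : String × List (String × String × String)) => r.insert g.1 g.2) PySem.Dict.empty).items := by
    show ((PySem.List.sorted ((PySem.Dict.ofList entry).items.foldl
        (fun d p =>
          if PySem.Str.isIn ";" p.1 then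
            match PySem.Str.split? p.1 ";" with
            | some [f, o] => d.modify o [] (fun b => b ++ [(f, o, p.2)])
            | _ => d
          else d)
        PySem.Dict.empty).keys (fun k => k)).foldl
        (fun r o => r.insert o (PySem.List.sorted (((PySem.Dict.ofList entry).items.foldl
          (fun d p =>
            if PySem.Str.isIn ";" p.1 then
              match PySem.Str.split? p.1 ";" with
              | some [f, o] => d.modify o [] (fun b => b ++ [(f, o, p.2)])
              | _ => d
            else d)
          PySem.Dict.empty).getD o []) (fun x => x.1)))
        PySem.Dict.empty).items = _
    rw [hstep, hkeysB]
    have h2 := PySem.List.foldl_congr_mem (PySem.List.sorted (PySem.Set.ofList ((pvT entry).map (fun t => t.2.1))) (fun k => k))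
      (fun (r : PySem.Dict String (List (String × String × String))) o =>
        r.insert o (PySem.List.sorted ((((pvT entry).map (fun t => (t.2.1, t))).foldl
          (fun d p => d.modify p.1 [] (fun b => b ++ [p.2])) PySem.Dict.empty).getD o [])
          (fun x => x.1)))
      (fun r o => r.insert o (pvB (pvT entry) o)) PySem.Dict.empty
      (by intro acc o _; simp only [hgetD o]; rfl)
    rw [h2, List.foldl_map]
    rfl
  rw [hA, hB]

-- ===== VERDICT (by name: the statement is the Claim_ definition above) =====
theorem group_entry_by_opt_py_spec : Claim_equal_group_entry_by_opt_py := by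
  intro entry _ hpre
  show group_entry_by_opt_py entry = group_entry_by_opt_py_alt entry
  exact pvMain entry hpre
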